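-- pv_equiv track=rewrite | github.com/kaixxx/QualCoder | src/qualcoder/ai_agent_prompts.py | _infer_description
-- ===== SOURCE A (Python) =====
-- from typing import Dict, List, Optional, Tuple
--
-- def _infer_description(body: str) -> str:
--     text = str(body if body is not None else "")
--     lines = [line.strip() for line in text.splitlines()]
--     paragraph: List[str] = []
--     in_paragraph = False
--     for line in lines:
--         if line == "":
--             if in_paragraph:
--                 break
--             continue
--         paragraph.append(line)
--         in_paragraph = True
--     if len(paragraph) == 0:
--         return ""
--     desc = " ".join(paragraph).strip()
--     if len(desc) > 240:
--         desc = desc[:237].rstrip() + "..."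
--     return desc
-- ===== SOURCE B (Python) =====
-- def _infer_description(body: str) -> str:
--     text = str(body if body is not None else "")
--     lines = [line.strip() for line in text.splitlines()]
--     n = len(lines)
--     i = 0
--     while i < n and lines[i] == "":
--         i += 1
--     if i == n:
--         return ""
--     j = i
--     while j < n and lines[j] != "":
--         j += 1
--     desc = " ".join(lines[i:j]).strip()
--     if len(desc) > 240:
--         desc = desc[:237].rstrip() + "..."
--     return desc
-- ===== Notes on version B (the rewrite author's own statement) =====
-- stated objective: alternative
-- what changed: Replaces A's single pass with a break flag and list accumulation by a two-pointer formulation: scan an index past the leading blank stripped lines, scan a second index to the end of the first non-blank run, and slice that run out; truncation is unchanged.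
import Mathlib
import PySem

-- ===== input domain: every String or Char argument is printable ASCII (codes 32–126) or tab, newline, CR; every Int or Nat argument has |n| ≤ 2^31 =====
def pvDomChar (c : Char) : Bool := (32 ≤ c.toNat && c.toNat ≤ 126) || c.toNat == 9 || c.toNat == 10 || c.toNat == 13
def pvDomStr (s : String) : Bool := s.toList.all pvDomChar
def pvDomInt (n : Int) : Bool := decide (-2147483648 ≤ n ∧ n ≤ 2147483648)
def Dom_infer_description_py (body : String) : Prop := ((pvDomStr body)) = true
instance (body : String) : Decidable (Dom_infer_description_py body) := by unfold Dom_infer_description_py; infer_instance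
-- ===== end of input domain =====

-- B replaces A's flag-and-accumulator loop by two index scans and a slice (same cost, different decomposition).

-- ===== PORT A =====
-- shared tail of both Pythons: desc = " ".join(para).strip(); truncate at 240 to desc[:237].rstrip()+"..."
def pvFinish (para : List (List Char)) : String :=
  let desc := PySem.Chars.strip (PySem.Chars.join [' '] para)
  if 240 < PySem.Chars.len desc then
    String.ofList (PySem.Chars.rstrip (PySem.Chars.slice desc none (some 237)) ++ ['.', '.', '.'])
  else String.ofList desc

-- A's for-loop with `break`/`continue`: state = (paragraph, in_paragraph)
def pvLoopA : List (List Char) → List (List Char) → Bool → List (List Char)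
  | [], para, _ => para
  | l :: ls, para, inp =>
    if l == [] then (if inp then para else pvLoopA ls para inp)
    else pvLoopA ls (para ++ [l]) true

def infer_description_py (body : String) : String :=
  let lines := (PySem.Chars.splitlines body.toList).map PySem.Chars.strip
  let paragraph := pvLoopA lines [] false
  if paragraph.length == 0 then "" else pvFinish paragraph

-- ===== PORT B =====
-- `while i < n and (lines[i] == "") == blank: i += 1` (blank = true for the first scan, false for the second)
def pvScanB (lines : List (List Char)) (blank : Bool) (i : Nat) : Nat :=
  if h : i < lines.length then
    if (lines[i] == []) == blank then pvScanB lines blank (i + 1) else i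
  else i
termination_by lines.length - i

def infer_description_py_alt (body : String) : String :=
  let lines := (PySem.Chars.splitlines body.toList).map PySem.Chars.strip
  let n := lines.length
  let i := pvScanB lines true 0
  if i == n then "" else
    let j := pvScanB lines false i
    pvFinish (PySem.List.slice lines (some (i : Int)) (some (j : Int)))

-- ===== PRECONDITION & SPEC =====
def Spec_infer_description_py (body : String) (out : String) : Prop := out = infer_description_py_alt body
instance (body : String) (out : String) : Decidable (Spec_infer_description_py body out) := by unfold Spec_infer_description_py; infer_instance

-- ===== CLAIM (what is proved, stated in full; the proofs are below) =====
def Claim_equal_infer_description_py : Prop := ∀ (body : String), Dom_infer_description_py body → Spec_infer_description_py body (infer_description_py body)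

-- ===== LEMMAS AND PROOFS =====

theorem pv_drop_len_takeWhile {α : Type} (p : α → Bool) (l : List α) :
    l.drop (l.takeWhile p).length = l.dropWhile p := by
  induction l with
  | nil => simp
  | cons a l ih => by_cases h : p a <;> simp [h, ih]

theorem pv_take_len_takeWhile {α : Type} (p : α → Bool) (l : List α) :
    l.take (l.takeWhile p).length = l.takeWhile p := by
  induction l with
  | nil => simp
  | cons a l ih => by_cases h : p a <;> simp [h, ih]

theorem pv_head_dropWhile {α : Type} (p : α → Bool) (l : List α) (a : α) (rest : List α)
    (h : l.dropWhile p = a :: rest) : p a = false := by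
  induction l with
  | nil => simp at h
  | cons b l ih =>
      by_cases hb : p b
      · rw [List.dropWhile_cons_of_pos hb] at h; exact ih h
      · rw [List.dropWhile_cons_of_neg hb] at h
        obtain ⟨rfl, -⟩ := List.cons.inj h
        simpa using hb

theorem pvScanB_spec (lines : List (List Char)) (blank : Bool) (i : Nat) :
    pvScanB lines blank i
      = i + ((lines.drop i).takeWhile (fun l => (l == []) == blank)).length := by
  by_cases h : i < lines.length
  · rw [pvScanB, dif_pos h, List.drop_eq_getElem_cons h]
    by_cases hp : ((lines[i] == []) == blank) = true
    · rw [if_pos hp, pvScanB_spec lines blank (i + 1),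
        List.takeWhile_cons_of_pos (p := fun l => (l == []) == blank) hp]
      rw [List.length_cons]
      omega
    · rw [if_neg hp, List.takeWhile_cons_of_neg (p := fun l => (l == []) == blank) hp]
      simp
  · rw [pvScanB, dif_neg h, List.drop_eq_nil_of_le (by omega)]
    simp
termination_by lines.length - i

theorem pvLoopA_true (ls : List (List Char)) (acc : List (List Char)) :
    pvLoopA ls acc true = acc ++ ls.takeWhile (fun l => (l == []) == false) := by
  induction ls generalizing acc with
  | nil => simp [pvLoopA]
  | cons l ls ih =>
      by_cases hl : (l == []) = true
      · rw [List.takeWhile_cons_of_neg (by simp [hl])]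
        simp [pvLoopA, hl]
      · have hl' : (l == []) = false := by simpa using hl
        rw [List.takeWhile_cons_of_pos (by simp [hl'])]
        simp only [pvLoopA, hl', Bool.false_eq_true, if_false, ih]
        simp

theorem pvLoopA_false (ls : List (List Char)) :
    pvLoopA ls [] false
      = (ls.dropWhile (fun l => (l == []) == true)).takeWhile (fun l => (l == []) == false) := by
  induction ls with
  | nil => simp [pvLoopA]
  | cons l ls ih =>
      by_cases hl : (l == []) = true
      · rw [List.dropWhile_cons_of_pos (by simp [hl])]
        simpa [pvLoopA, hl] using ih
      · have hl' : (l == []) = false := by simpa using hl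
        rw [List.dropWhile_cons_of_neg (by simp [hl']),
          List.takeWhile_cons_of_pos (by simp [hl'])]
        simp only [pvLoopA, hl', Bool.false_eq_true, if_false]
        simpa using pvLoopA_true ls [l]

theorem pv_scan1_eq (ls : List (List Char)) :
    pvScanB ls true 0 = (ls.takeWhile (fun l => (l == []) == true)).length := by
  have h := pvScanB_spec ls true 0
  rwa [List.drop_zero, Nat.zero_add] at h

theorem pv_cond_eq (ls : List (List Char)) :
    ((pvLoopA ls [] false).length == 0) = (pvScanB ls true 0 == ls.length) := by
  have hdropi := pv_drop_len_takeWhile (fun l => (l == []) == true) ls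
  have hile : (ls.takeWhile (fun l => (l == []) == true)).length ≤ ls.length :=
    (List.takeWhile_prefix _).length_le
  rw [pv_scan1_eq, pvLoopA_false]
  by_cases hempty : ls.dropWhile (fun l => (l == []) == true) = []
  · have hlen : ls.length ≤ (ls.takeWhile (fun l => (l == []) == true)).length := by
      have hd : ls.drop (ls.takeWhile (fun l => (l == []) == true)).length = [] := by
        rw [hdropi, hempty]
      have := List.drop_eq_nil_iff.mp hd
      omega
    rw [hempty, Nat.le_antisymm hile hlen]
    simp only [List.takeWhile_nil, List.length_nil, beq_self_eq_true]
  · obtain ⟨a, rest, hcons⟩ := List.exists_cons_of_ne_nil hempty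
    have ha : (a == []) = false := by
      simpa using pv_head_dropWhile _ ls a rest hcons
    have hne : (ls.takeWhile (fun l => (l == []) == true)).length ≠ ls.length := fun hc =>
      hempty (by rw [← hdropi, hc, List.drop_length])
    have hR : ((ls.takeWhile (fun l => (l == []) == true)).length == ls.length) = false := by
      simp only [beq_eq_false_iff_ne, ne_eq]
      exact hne
    rw [hcons, List.takeWhile_cons_of_pos (p := fun l => (l == []) == false)
        (by show ((a == []) == false) = true; rw [ha]; rfl),
      List.length_cons, hR]
    rfl

theorem pv_slice_eq (ls : List (List Char)) :
    PySem.List.slice ls (some ((pvScanB ls true 0 : Nat) : Int))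
        (some ((pvScanB ls false (pvScanB ls true 0) : Nat) : Int))
      = pvLoopA ls [] false := by
  have hdropi := pv_drop_len_takeWhile (fun l => (l == []) == true) ls
  have hj : pvScanB ls false (pvScanB ls true 0)
      = pvScanB ls true 0
        + ((ls.dropWhile (fun l => (l == []) == true)).takeWhile
            (fun l => (l == []) == false)).length := by
    rw [pvScanB_spec ls false (pvScanB ls true 0), pv_scan1_eq, hdropi]
  rw [PySem.List.slice_toNat ls (by positivity) (by positivity)]
  simp only [Int.toNat_natCast]
  rw [hj, Nat.add_sub_cancel_left, pv_scan1_eq, hdropi, pvLoopA_false]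
  exact pv_take_len_takeWhile _ _

-- ===== VERDICT (by name: the statement is the Claim_ definition above) =====
theorem infer_description_py_spec : Claim_equal_infer_description_py := by
  intro body _
  simp only [Spec_infer_description_py, infer_description_py, infer_description_py_alt]
  rw [pv_cond_eq, ← pv_slice_eq]
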